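-- pv_equiv track=rewrite | github.com/jameskhedley/advent-of-code-solutions | 2025/day1.py | part2
-- ===== SOURCE A (Python) =====
-- from math import ceil
--
-- def part2(l1):
--     pos = 50
--     count = 0
--     for turn in l1:
--         old = int(pos)
--         pos = (old + turn) % 100
--         spins, rot = divmod(abs(turn), 100)
--         count += spins
--         if old == 0:
--             continue
--         if turn < 0:
--             rot =  -rot
--             if old + rot < 1:
--                 clicks = ceil(abs(rot)/100)
--                 count += clicks
--         else:
--             if old + rot > 99:
--                 clicks = ceil(abs(rot)/100)
--                 count += clicks
--     return count
-- ===== SOURCE B (Python) =====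
-- def part2(l1):
--     # Unbounded running position; count multiples of 100 crossed per step.
--     c = 50
--     count = 0
--     for t in l1:
--         if t >= 0:
--             count += (c + t) // 100 - c // 100
--         else:
--             count += (-(c + t)) // 100 - (-c) // 100
--         c += t
--     return count
-- ===== Notes on version B (the rewrite author's own statement) =====
-- stated objective: simpler
-- what changed: B keeps one unbounded running position and counts boundary crossings with two floor divisions per step, eliminating A's mod-100 position, the divmod spins/rot split, the old==0 special case and the ceil-based click test.
import Mathlib
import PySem

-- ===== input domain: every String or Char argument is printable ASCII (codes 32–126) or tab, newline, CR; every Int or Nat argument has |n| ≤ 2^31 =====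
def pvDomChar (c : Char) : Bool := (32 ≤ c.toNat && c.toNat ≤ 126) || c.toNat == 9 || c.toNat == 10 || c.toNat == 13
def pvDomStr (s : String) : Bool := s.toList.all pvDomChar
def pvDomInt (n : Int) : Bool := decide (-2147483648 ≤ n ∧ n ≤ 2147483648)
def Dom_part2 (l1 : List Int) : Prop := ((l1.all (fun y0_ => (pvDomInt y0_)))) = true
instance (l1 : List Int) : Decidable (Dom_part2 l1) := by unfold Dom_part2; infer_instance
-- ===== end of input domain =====

-- B replaces the mod-100 position with an unbounded running position and counts the
-- multiples of 100 crossed by each step with two floor divisions, dropping the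
-- divmod/spins split and the ceil-based click test (objective: simpler).

-- ===== PORT A =====
-- one loop iteration of A over the state (pos, count)
-- divmod(abs(turn), 100) is ported as (floordiv, mod) — the divisor 100 is nonzero;
-- ceil(abs(rot)/100) is ported as the integer ceiling -((-abs rot) // 100), exact on ints.
def part2_stepA (s : Int × Int) (t : Int) : Int × Int :=
  let old := s.1
  let pos := PySem.Int.mod (old + t) 100
  let spins := PySem.Int.floordiv |t| 100
  let rot := PySem.Int.mod |t| 100
  let count := s.2 + spins
  if old = 0 then (pos, count)
  else if t < 0 then
    let rot := -rot
    if old + rot < 1 then (pos, count + (-(PySem.Int.floordiv (-|rot|) 100))) else (pos, count)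
  else
    if old + rot > 99 then (pos, count + (-(PySem.Int.floordiv (-|rot|) 100))) else (pos, count)

def part2 (l1 : List Int) : Int :=
  (l1.foldl part2_stepA (50, 0)).2

-- ===== PORT B =====
-- one loop iteration of B over the state (c, count)
def part2_stepB (s : Int × Int) (t : Int) : Int × Int :=
  let c := s.1
  let count :=
    if t ≥ 0 then
      s.2 + (PySem.Int.floordiv (c + t) 100 - PySem.Int.floordiv c 100)
    else
      s.2 + (PySem.Int.floordiv (-(c + t)) 100 - PySem.Int.floordiv (-c) 100)
  (c + t, count)

def part2_alt (l1 : List Int) : Int :=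
  (l1.foldl part2_stepB (50, 0)).2

-- ===== PRECONDITION & SPEC =====
def Spec_part2 (l1 : List Int) (out : Int) : Prop := out = part2_alt l1
instance (l1 : List Int) (out : Int) : Decidable (Spec_part2 l1 out) := by unfold Spec_part2; infer_instance

-- ===== CLAIM (what is proved, stated in full; the proofs are below) =====
def Claim_equal_part2 : Prop := ∀ (l1 : List Int), Dom_part2 l1 → Spec_part2 l1 (part2 l1)

-- ===== LEMMAS AND PROOFS =====

-- per-step simulation: A's state is B's state with the position reduced mod 100
theorem part2_step_sim (c k t : Int) :
    part2_stepA (PySem.Int.mod c 100, k) t =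
      (PySem.Int.mod (c + t) 100, (part2_stepB (c, k) t).2) := by
  simp only [part2_stepA, part2_stepB,
    PySem.Int.mod_eq_emod_of_pos (by norm_num : (0:Int) < 100),
    PySem.Int.floordiv_eq_ediv_of_pos (by norm_num : (0:Int) < 100)]
  by_cases ht : 0 ≤ t
  · simp only [abs_of_nonneg ht,
      abs_of_nonneg (Int.emod_nonneg t (by norm_num : (100:Int) ≠ 0))]
    split_ifs <;> exact Prod.ext (by first | (simp; omega) | simp) (by first | (simp; omega) | simp)
  · simp only [abs_of_neg (by omega : t < 0), abs_neg,
      abs_of_nonneg (Int.emod_nonneg (-t) (by norm_num : (100:Int) ≠ 0))]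
    split_ifs <;> exact Prod.ext (by first | (simp; omega) | simp) (by first | (simp; omega) | simp)

theorem part2_fold_sim (l : List Int) : ∀ (c k : Int),
    (l.foldl part2_stepA (PySem.Int.mod c 100, k)).2 =
      (l.foldl part2_stepB (c, k)).2 := by
  induction l with
  | nil => intro c k; rfl
  | cons t l ih =>
    intro c k
    simp only [List.foldl_cons, part2_step_sim]
    exact ih (c + t) (part2_stepB (c, k) t).2

-- ===== VERDICT (by name: the statement is the Claim_ definition above) =====
theorem part2_spec : Claim_equal_part2 := by
  intro l1 _
  unfold Spec_part2 part2 part2_alt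
  have h : (50 : Int) = PySem.Int.mod 50 100 := by decide
  rw [h]
  exact part2_fold_sim l1 50 0
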